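-- pv_equiv track=rewrite | github.com/Kyostenas/prettyTables | prettyTables/cells.py | __wrap_single_row
-- ===== SOURCE A (Python) =====
-- from typing import Any, List, Tuple, Union
--
-- def __wrap_single_row(row: Union[list, tuple]) -> list:
--     """
--     Will split every cell that has an new line character.
--     The splitted cell generates a new sub-row, and every other
--     cell that doesn't have a new line character will be adjusted::
--
--         __wrap_single_row(['a', 'b\\nc'])
--
--     Results in:
--
--     >>> [['a', 'b'], ['', 'c']]
--     >>>                ^
--     >>> # Blank space to adjust the cell.
--     """
--     # Split in lines if any new line characters are present.
--     splitted_cells = list(map(__wrap_cell, row))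
--
--     # Get the quantity of sub-rows calculating the max length of
--     # all of the splitted (or not) cells.
--     quantity_of_sub_rows = max([len(x) for x in splitted_cells])
--
--     # Create blank sub-rows each one having the same quantity of
--     # cells as the original row.
--     sub_rows = [['' for x in range(len(row))]
--                 for _ in range(quantity_of_sub_rows)]
--
--     # Fill the sub-rows with the splitted cells.
--     #
--     # [['a'], ['b', 'c']]       <-- splitted_cells
--     #    ^      ^    ^
--     #  sbr0   sbr0  sbr1
--     # <cell0> <--cell1-->
--     #
--     # [['a', 'b'], ['', 'c']]   <-- sub_rows (being filled)
--     #    ^    ^     ^    ^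
--     # [0][0] [0][1] ^  [1][1]   <-- sub_rows[sub_row][cell]
--     # [0][0] [1][0] ^  [1][1]   <-- splitted_cells[cell][sub-row]
--     #               ^
--     #   There's no second sub-row in the first cell,
--     #   so it's just left empty
--     #
--     for cell in range(len(splitted_cells)):
--         for sub_row in range(len(splitted_cells[cell])):
--             sub_rows[sub_row][cell] = splitted_cells[cell][sub_row]
--
--     return sub_rows
--
-- def __wrap_cell(cell: Any) -> Union[List[str], Any]:
--     """
--     Split in lines a cell if it has a new line character::
--
--         'a' -> ['a']
--         'a\\nb' -> ['a', 'b']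
--         '' -> ['']
--         123 -> [123]
--         None -> [None]
--     """
--     # Only if the cell is a string.
--     if isinstance(cell, str):
--         if cell != '':
--             # If the cell is not empty,
--             # apply the str method splitlines
--             return cell.splitlines()
--         else:
--             # Return a list with empty string in case of empty cell.
--             return ['']
--     else:
--         # If the cell is not a string, return it as it is.
--         return [cell]
-- ===== SOURCE B (Python) =====
-- def __wrap_cell(cell):
--     if isinstance(cell, str):
--         return cell.splitlines() if cell != '' else ['']
--     return [cell]
--
--
-- def __wrap_single_row(row):
--     # Single streaming pass: grow the sub-rows incrementally as cells arrive.
--     # When a cell is taller than the rows built so far, open new sub-rows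
--     # padded with '' for the cells already consumed; then append this cell's
--     # line (or '') to every sub-row.
--     sub_rows = []
--     seen = 0
--     for cell in row:
--         lines = __wrap_cell(cell)
--         while len(sub_rows) < len(lines):
--             sub_rows.append([''] * seen)
--         for i, sub_row in enumerate(sub_rows):
--             sub_row.append(lines[i] if i < len(lines) else '')
--         seen += 1
--     return sub_rows
-- ===== Notes on version B (the rewrite author's own statement) =====
-- stated objective: alternative
-- what changed: B replaces A's two-phase preallocate-blank-grid-then-scatter-by-index with a single streaming pass over the cells that grows the sub-rows incrementally, opening ''-padded new sub-rows when a taller cell arrives and appending each cell's line to every sub-row.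
import Mathlib
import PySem

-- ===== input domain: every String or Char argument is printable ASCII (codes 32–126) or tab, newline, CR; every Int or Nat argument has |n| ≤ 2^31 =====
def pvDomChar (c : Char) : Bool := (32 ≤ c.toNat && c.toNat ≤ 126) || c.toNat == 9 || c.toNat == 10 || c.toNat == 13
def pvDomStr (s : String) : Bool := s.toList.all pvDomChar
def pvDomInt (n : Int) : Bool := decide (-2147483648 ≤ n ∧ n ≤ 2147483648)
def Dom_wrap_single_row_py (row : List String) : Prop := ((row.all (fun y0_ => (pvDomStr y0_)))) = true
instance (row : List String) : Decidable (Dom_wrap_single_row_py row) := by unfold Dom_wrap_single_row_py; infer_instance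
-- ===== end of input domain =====

-- B builds the sub-rows in one streaming pass with an accumulator (growing them as
-- taller cells arrive) instead of A's pre-allocated blank grid filled by nested index
-- loops; return value only, no argument mutation (objective: alternative).

-- ===== PORT A =====
-- __wrap_cell (shared module helper, identical in Source A and Source B)
def pvWrapCell (cell : String) : List String :=
  if cell ≠ "" then PySem.Str.splitlines cell else [""]

-- indices coming from range() are always in bounds, so getD is exact here
def wrap_single_row_py (row : List String) : List (List String) :=
  let splitted_cells := row.map pvWrapCell
  match PySem.List.max? (splitted_cells.map (fun x => x.length)) (fun x => x) with
  | none => []   -- unreachable under Pre_ (Python raises ValueError on max([]))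
  | some quantity_of_sub_rows =>
    let sub_rows := (List.range quantity_of_sub_rows).map
      (fun _ => (List.range row.length).map (fun _ => ""))
    (List.range splitted_cells.length).foldl (fun g cell =>
      (List.range (splitted_cells.getD cell []).length).foldl (fun g' sub_row =>
        g'.modify sub_row (fun rw => rw.set cell ((splitted_cells.getD cell []).getD sub_row ""))) g)
      sub_rows

-- ===== PORT B =====
-- streaming pass; state = (sub_rows built so far, number of cells consumed);
-- the while-loop padding is the List.replicate append, enumerate is mapIdx
def wrap_single_row_py_alt (row : List String) : List (List String) :=
  (row.foldl (fun (st : List (List String) × Nat) cell =>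
      let lines := pvWrapCell cell
      let padded := st.1 ++ List.replicate (lines.length - st.1.length) (List.replicate st.2 "")
      (padded.mapIdx (fun i sub => sub ++ [if i < lines.length then lines.getD i "" else ""]),
       st.2 + 1))
    ([], 0)).1

-- ===== PRECONDITION & SPEC =====
-- Pre_ excludes only the empty row, on which Python A raises ValueError (max of an empty list).
def Pre_wrap_single_row_py (row : List String) : Prop := row ≠ []
instance (row : List String) : Decidable (Pre_wrap_single_row_py row) := by
  unfold Pre_wrap_single_row_py; infer_instance

def pvWitness_wrap_single_row_py : List String := ["a", "b\nc"]

def Spec_wrap_single_row_py (row : List String) (out : List (List String)) : Prop :=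
  out = wrap_single_row_py_alt row
instance (row : List String) (out : List (List String)) : Decidable (Spec_wrap_single_row_py row out) := by
  unfold Spec_wrap_single_row_py; infer_instance

-- ===== CLAIM =====
def Claim_equal_wrap_single_row_py : Prop := ∀ (row : List String),
  Dom_wrap_single_row_py row → Pre_wrap_single_row_py row →
  Spec_wrap_single_row_py row (wrap_single_row_py row)

-- ===== LEMMAS AND PROOFS =====

-- the common mathematical description: row r of the padded transpose
def pvF (r : Nat) (lines : List String) : String :=
  if r < lines.length then lines.getD r "" else ""

def pvTrans (S : List (List String)) (q : Nat) : List (List String) :=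
  (List.range q).map (fun r => S.map (pvF r))

def pvH (S : List (List String)) : Nat := S.foldl (fun m l => max m l.length) 0

-- ---- A-side lemmas (grid + scatter loops) ----

def pvVal (S : List (List String)) (c r : Nat) : String := (S.getD c []).getD r ""

def pvInner (S : List (List String)) (c : Nat) (n : Nat) (g : List (List String)) :
    List (List String) :=
  (List.range n).foldl (fun g' r => g'.modify r (fun rw => rw.set c (pvVal S c r))) g

def pvOuter (S : List (List String)) (k : Nat) (g : List (List String)) :
    List (List String) :=
  (List.range k).foldl (fun g c => pvInner S c (S.getD c []).length g) g

def pvUpdRow (S : List (List String)) (r : Nat) (k : Nat) (rw : List String) : List String :=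
  (List.range k).foldl (fun rw c => if r < (S.getD c []).length then rw.set c (pvVal S c r) else rw) rw

theorem pvInner_getElem? (S : List (List String)) (c n : Nat) (g : List (List String)) (r' : Nat) :
    (pvInner S c n g)[r']? =
      if r' < n then (g[r']?).map (fun rw => rw.set c (pvVal S c r')) else g[r']? := by
  induction n with
  | zero => simp [pvInner]
  | succ n ih =>
    simp only [pvInner, List.range_succ, List.foldl_append, List.foldl_cons, List.foldl_nil]
    rw [show (List.range n).foldl (fun g' r => g'.modify r (fun rw => rw.set c (pvVal S c r))) g
          = pvInner S c n g from rfl]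
    rw [List.getElem?_modify]
    by_cases h1 : r' = n
    · subst h1
      simp [ih]
    · by_cases h2 : r' < n
      · simp [ih, h2, Nat.lt_succ_of_lt h2, Ne.symm h1]
      · have h3 : ¬ r' < n + 1 := by omega
        simp [ih, h2, h3, Ne.symm h1]

theorem pvUpdRow_succ (S : List (List String)) (r' k : Nat) (rw : List String) :
    pvUpdRow S r' (k + 1) rw =
      (if r' < (S.getD k []).length then (pvUpdRow S r' k rw).set k (pvVal S k r')
       else pvUpdRow S r' k rw) := by
  simp only [pvUpdRow, List.range_succ, List.foldl_append, List.foldl_cons, List.foldl_nil]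

theorem pvUpdRow_length (S : List (List String)) (r' k : Nat) (rw : List String) :
    (pvUpdRow S r' k rw).length = rw.length := by
  induction k with
  | zero => rfl
  | succ k ih => rw [pvUpdRow_succ]; split <;> simp [ih]

theorem pvOuter_getElem? (S : List (List String)) (k : Nat) (g : List (List String)) (r' : Nat) :
    (pvOuter S k g)[r']? = (g[r']?).map (pvUpdRow S r' k) := by
  induction k generalizing g with
  | zero => cases h : g[r']? <;> simp [pvOuter, pvUpdRow, h]
  | succ k ih =>
    simp only [pvOuter, List.range_succ, List.foldl_append, List.foldl_cons, List.foldl_nil]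
    rw [show (List.range k).foldl (fun g c => pvInner S c (S.getD c []).length g) g
          = pvOuter S k g from rfl]
    rw [pvInner_getElem?, ih]
    cases hg : g[r']? with
    | none => simp
    | some a =>
      simp only [Option.map_some, pvUpdRow_succ]
      split <;> rfl

theorem pvUpdRow_getElem? (S : List (List String)) (r' k : Nat) (rw : List String) (c' : Nat) :
    (pvUpdRow S r' k rw)[c']? =
      if c' < k ∧ r' < (S.getD c' []).length then
        (if c' < rw.length then some (pvVal S c' r') else none)
      else rw[c']? := by
  induction k with
  | zero => simp [pvUpdRow]
  | succ k ih =>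
    rw [pvUpdRow_succ]
    by_cases hk : r' < (S.getD k []).length
    · rw [if_pos hk, List.getElem?_set, pvUpdRow_length, ih]
      by_cases h1 : c' = k
      · subst h1
        rw [if_pos rfl,
          if_pos (show c' < c' + 1 ∧ r' < (S.getD c' []).length from ⟨Nat.lt_succ_self c', hk⟩)]
      · rw [if_neg (Ne.symm h1)]
        have h2 : (c' < k ∧ r' < (S.getD c' []).length)
            ↔ (c' < k + 1 ∧ r' < (S.getD c' []).length) := by
          constructor
          · rintro ⟨a, b⟩; exact ⟨by omega, b⟩
          · rintro ⟨a, b⟩; exact ⟨by omega, b⟩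
        rw [if_congr h2 rfl rfl]
    · rw [if_neg hk, ih]
      by_cases h1 : c' = k
      · subst h1
        rw [if_neg (fun h => Nat.lt_irrefl _ h.1), if_neg (fun h => hk h.2)]
      · have h2 : (c' < k ∧ r' < (S.getD c' []).length)
            ↔ (c' < k + 1 ∧ r' < (S.getD c' []).length) := by
          constructor
          · rintro ⟨a, b⟩; exact ⟨by omega, b⟩
          · rintro ⟨a, b⟩; exact ⟨by omega, b⟩
        rw [if_congr h2 rfl rfl]

theorem pvUpdRow_blank (S : List (List String)) (r' L : Nat) (hL : L = S.length) :
    pvUpdRow S r' L ((List.range L).map (fun _ => "")) = S.map (pvF r') := by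
  apply List.ext_getElem?
  intro c'
  rw [pvUpdRow_getElem?]
  simp only [List.getElem?_map, List.length_map, List.length_range]
  by_cases hc : c' < L
  · have hc' : c' < S.length := hL ▸ hc
    have hS : S[c']? = some S[c'] := List.getElem?_eq_getElem hc'
    have hSD : S.getD c' [] = S[c'] := by
      simp [List.getD, hS]
    by_cases hr : r' < (S.getD c' []).length
    · simp [hc, hS, pvVal, pvF, hSD ▸ hr]
    · have hr2 : ¬ r' < S[c'].length := by rw [← hSD]; exact hr
      simp [hc, hS, hr2, pvF]
  · have hc' : ¬ c' < S.length := hL ▸ hc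
    have h1 : ¬ (c' < L ∧ r' < (S.getD c' []).length) := by tauto
    rw [if_neg h1]
    rw [List.getElem?_eq_none (by simpa using Nat.le_of_not_lt hc),
      List.getElem?_eq_none (Nat.le_of_not_lt hc')]
    simp

-- ---- B-side lemmas (streaming accumulator) ----

theorem pvH_init_le (S : List (List String)) (a : Nat) :
    a ≤ S.foldl (fun m l => max m l.length) a := by
  induction S generalizing a with
  | nil => simp
  | cons x t ih => exact le_trans (le_max_left a x.length) (ih _)

theorem pvH_mem_le (S : List (List String)) (l : List String) (h : l ∈ S) (a : Nat) :
    l.length ≤ S.foldl (fun m l => max m l.length) a := by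
  induction S generalizing a with
  | nil => cases h
  | cons x t ih =>
    cases h with
    | head => exact le_trans (le_max_right a l.length) (pvH_init_le t _)
    | tail _ h' => exact ih h' _

theorem pvStep_eq (S : List (List String)) (lines : List String) :
    ((pvTrans S (pvH S) ++
        List.replicate (lines.length - pvH S) (List.replicate S.length "")).mapIdx
      (fun i sub => sub ++ [if i < lines.length then lines.getD i "" else ""]))
    = pvTrans (S ++ [lines]) (max (pvH S) lines.length) := by
  apply List.ext_getElem?
  intro r
  rw [List.getElem?_mapIdx]
  simp only [pvTrans, List.getElem?_map, List.getElem?_append, List.length_map,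
    List.length_range]
  by_cases h1 : r < pvH S
  · have hr : r < max (pvH S) lines.length := lt_of_lt_of_le h1 (le_max_left _ _)
    simp [h1, hr, pvF, List.map_append]
  · by_cases h2 : r < max (pvH S) lines.length
    · have hr2 : r - pvH S < lines.length - pvH S := by omega
      simp only [List.getElem?_range h2, List.getElem?_replicate, if_pos hr2]
      rw [if_neg h1]
      simp only [Option.map_some, Option.some.injEq]
      rw [List.map_append]
      congr 1
      · rw [show (List.replicate S.length "" : List String) = S.map (fun _ => "") by
          simp [List.map_const']]
        apply List.map_congr_left
        intro l hl
        have hle := pvH_mem_le S l hl 0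
        have hnr : ¬ r < l.length := by unfold pvH at h1; omega
        simp [pvF, hnr]
    · have h3 : ¬ r - pvH S < lines.length - pvH S := by omega
      rw [if_neg h1, List.getElem?_replicate, if_neg h3,
        List.getElem?_eq_none (by simpa using Nat.le_of_not_lt h2)]
      simp

theorem pvAlt_invariant (row : List String) :
    (row.foldl (fun (st : List (List String) × Nat) cell =>
        let lines := pvWrapCell cell
        let padded := st.1 ++ List.replicate (lines.length - st.1.length) (List.replicate st.2 "")
        (padded.mapIdx (fun i sub => sub ++ [if i < lines.length then lines.getD i "" else ""]),
         st.2 + 1))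
      ([], 0))
    = (pvTrans (row.map pvWrapCell) (pvH (row.map pvWrapCell)), row.length) := by
  induction row using List.reverseRecOn with
  | nil => simp [pvTrans, pvH]
  | append_singleton t c ih =>
    rw [List.foldl_append, ih]
    simp only [List.foldl_cons, List.foldl_nil]
    have hlen : (pvTrans (t.map pvWrapCell) (pvH (t.map pvWrapCell))).length
        = pvH (t.map pvWrapCell) := by simp [pvTrans]
    refine Prod.ext ?_ (by simp)
    show ((pvTrans (t.map pvWrapCell) (pvH (t.map pvWrapCell)) ++
        List.replicate ((pvWrapCell c).length
          - (pvTrans (t.map pvWrapCell) (pvH (t.map pvWrapCell))).length)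
          (List.replicate t.length "")).mapIdx
        (fun i sub => sub ++ [if i < (pvWrapCell c).length then (pvWrapCell c).getD i "" else ""]))
      = pvTrans ((t ++ [c]).map pvWrapCell) (pvH ((t ++ [c]).map pvWrapCell))
    rw [hlen, show t.length = (t.map pvWrapCell).length by simp, pvStep_eq]
    have : pvH ((t ++ [c]).map pvWrapCell) = max (pvH (t.map pvWrapCell)) (pvWrapCell c).length := by
      simp [pvH, List.map_append, List.foldl_append]
    rw [this, List.map_append]
    rfl

theorem pvAlt_eq_trans (row : List String) :
    wrap_single_row_py_alt row = pvTrans (row.map pvWrapCell) (pvH (row.map pvWrapCell)) := by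
  unfold wrap_single_row_py_alt
  rw [pvAlt_invariant]

-- with identity key, Python's max over a nonempty list is the running max from the head
theorem pv_max_eq (l0 : Nat) (ls : List Nat) :
    PySem.List.max? (l0 :: ls) (fun x => x) = some (ls.foldl max l0) :=
  PySem.List.max?_id_cons l0 ls

-- ===== VERDICT =====
theorem wrap_single_row_py_spec : Claim_equal_wrap_single_row_py := by
  intro row _hdom hpre
  unfold Spec_wrap_single_row_py
  rw [pvAlt_eq_trans]
  unfold wrap_single_row_py
  obtain ⟨s0, rest, hrow⟩ : ∃ s0 rest, row = s0 :: rest := by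
    cases row with
    | nil => exact absurd rfl hpre
    | cons a l => exact ⟨a, l, rfl⟩
  subst hrow
  set S := (s0 :: rest).map pvWrapCell with hS
  have hmax : PySem.List.max? (S.map (fun x => x.length)) (fun x => x)
      = some ((rest.map pvWrapCell |>.map (fun x => x.length)).foldl max (pvWrapCell s0).length) := by
    simp only [hS, List.map_cons]
    exact pv_max_eq _ _
  have hq : pvH S
      = (rest.map pvWrapCell |>.map (fun x => x.length)).foldl max (pvWrapCell s0).length := by
    simp only [pvH, hS, List.map_cons, List.foldl_cons, Nat.zero_max, List.foldl_map]
  simp only [hmax, ← hq]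
  set q := pvH S with hqdef
  set L := (s0 :: rest).length with hLdef
  have hSL : L = S.length := by simp [hS, hLdef]
  rw [show (List.range S.length).foldl (fun g cell =>
      (List.range (S.getD cell []).length).foldl (fun g' sub_row =>
        g'.modify sub_row (fun rw => rw.set cell ((S.getD cell []).getD sub_row ""))) g)
      ((List.range q).map (fun _ => (List.range L).map (fun _ => "")))
    = pvOuter S S.length ((List.range q).map (fun _ => (List.range L).map (fun _ => ""))) from rfl]
  apply List.ext_getElem?
  intro r'
  rw [pvOuter_getElem?]
  simp only [pvTrans, List.getElem?_map]
  by_cases hr : r' < q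
  · simp only [List.getElem?_range hr, Option.map_some]
    rw [hSL] at *
    rw [pvUpdRow_blank S r' S.length rfl]
  · rw [List.getElem?_eq_none (l := List.range q) (by simpa using Nat.le_of_not_lt hr)]
    simp
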